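-- pv_equiv track=rewrite | github.com/tlkahn/leetcode-dojo | number-of-closed-islands.py | closedIsland
-- ===== SOURCE A (Python) =====
-- from typing import List
--
-- def closedIsland(grid: List[List[int]]) -> int:
--     res = 0
--     N = len(grid)
--     M = len(grid[0])
--     land = 0
--     water = 1
--
--     def dfs(i, j):
--         if i < 0 or j < 0 or i >= N or j >= M or grid[i][j] == water:
--             return
--         grid[i][j] = water
--         dfs(i - 1, j)
--         dfs(i, j - 1)
--         dfs(i + 1, j)
--         dfs(i, j + 1)
--
--     for i in range(M):
--         dfs(0, i)
--         dfs(N - 1, i)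
--
--     for i in range(N):
--         dfs(i, 0)
--         dfs(i, M - 1)
--
--     for i in range(N):
--         for j in range(M):
--             if grid[i][j] == land:
--                 dfs(i, j)
--                 res += 1
--
--     return res
-- ===== SOURCE B (Python) =====
-- from typing import List
--
-- def closedIsland(grid: List[List[int]]) -> int:
--     N = len(grid)
--     M = len(grid[0])
--
--     def flood(i, j):
--         # iterative flood fill with an explicit stack (top = end of list)
--         stack = [(i, j)]
--         while stack:
--             x, y = stack.pop()
--             if x < 0 or y < 0 or x >= N or y >= M or grid[x][y] == 1:
--                 continue
--             grid[x][y] = 1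
--             stack.append((x, y + 1))
--             stack.append((x + 1, y))
--             stack.append((x, y - 1))
--             stack.append((x - 1, y))
--
--     seeds = [p for j in range(M) for p in ((0, j), (N - 1, j))] \
--           + [p for i in range(N) for p in ((i, 0), (i, M - 1))]
--     for p in seeds:
--         flood(*p)
--
--     res = 0
--     for i in range(N):
--         for j in range(M):
--             if grid[i][j] == 0:
--                 flood(i, j)
--                 res += 1
--     return res
-- ===== Notes on version B (the rewrite author's own statement) =====
-- stated objective: alternative
-- what changed: The recursive DFS helper is replaced by an iterative flood fill over an explicit stack (pop a cell, guard, mark, push the four neighbours), and the border phase is driven by one precomputed seed list instead of two loops with paired recursive calls.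
import Mathlib
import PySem

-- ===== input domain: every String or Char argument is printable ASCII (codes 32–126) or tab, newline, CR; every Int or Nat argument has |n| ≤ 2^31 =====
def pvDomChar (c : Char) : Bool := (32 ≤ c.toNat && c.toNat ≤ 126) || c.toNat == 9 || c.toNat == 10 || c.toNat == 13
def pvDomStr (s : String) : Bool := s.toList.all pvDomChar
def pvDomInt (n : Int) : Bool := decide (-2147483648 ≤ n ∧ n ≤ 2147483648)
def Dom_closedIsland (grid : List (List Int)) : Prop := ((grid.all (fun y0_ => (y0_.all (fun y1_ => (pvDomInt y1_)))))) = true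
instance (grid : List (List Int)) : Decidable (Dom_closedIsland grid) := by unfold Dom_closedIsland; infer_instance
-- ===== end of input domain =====

-- B replaces the recursive DFS helper by an iterative flood fill over an explicit stack;
-- objective: alternative decomposition, same asymptotic cost. Both A and B mutate the grid
-- in place in Python (same cells are set to 1); the theorems are about the return value.

-- shared low-level grid access (exact under Pre_, where every touched index is in range):
-- grid[i][j] read; both Pythons only evaluate it after the bounds guard 0 ≤ i < N, 0 ≤ j < M
def cellGet (g : List (List Int)) (i j : Int) : Int :=
  (g.getD i.toNat []).getD j.toNat 1

-- grid[i][j] = 1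
def cellSet (g : List (List Int)) (i j : Int) : List (List Int) :=
  g.set i.toNat ((g.getD i.toNat []).set j.toNat 1)

-- number of non-water cells: the termination measure for both flood fills
def nonWater (g : List (List Int)) : Nat :=
  (g.map (fun r => r.countP (fun x => x != 1))).sum

-- termination helper (needed by the ports' recursions, hence above them)
theorem countP_set_one_lt (r : List Int) (m : Nat) (h : r.getD m 1 ≠ 1) :
    (r.set m 1).countP (fun x => x != 1) < r.countP (fun x => x != 1) := by
  induction r generalizing m with
  | nil => simp [List.getD] at h
  | cons a t ih =>
    cases m with
    | zero => simp [List.getD] at h; simp [h]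
    | succ m =>
      have := ih m (by simpa [List.getD] using h)
      simp only [List.set, List.countP_cons]
      omega

theorem sum_set_lt (l : List Nat) (n : Nat) (a : Nat) (hn : n < l.length)
    (ha : a < l.getD n 0) : (l.set n a).sum < l.sum := by
  induction l generalizing n with
  | nil => simp at hn
  | cons b t ih =>
    cases n with
    | zero => simp [List.getD] at ha ⊢; omega
    | succ n =>
      have := ih n (by simpa using hn) (by simpa [List.getD] using ha)
      simp only [List.set, List.sum_cons]
      omega

theorem nonWater_cellSet_lt (g : List (List Int)) (i j : Int)
    (h : cellGet g i j ≠ 1) : nonWater (cellSet g i j) < nonWater g := by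
  unfold cellGet at h
  have hn : i.toNat < g.length := by
    by_contra hc
    have hrow : g.getD i.toNat [] = [] := List.getD_eq_default _ _ (by omega)
    rw [hrow] at h
    simp [List.getD] at h
  have hg : g.getD i.toNat [] = g[i.toNat] := List.getD_eq_getElem _ _ hn
  unfold nonWater cellSet
  rw [List.map_set]
  have hgd : (g.map (fun r => r.countP (fun x => x != 1))).getD i.toNat 0
      = g[i.toNat].countP (fun x => x != 1) := by
    rw [List.getD_eq_getElem _ _ (by simpa using hn)]
    simp
  apply sum_set_lt _ _ _ (by simpa using hn)
  rw [hgd, hg]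
  exact countP_set_one_lt _ _ (hg ▸ h)

-- ===== PORT A =====
-- the recursive dfs of A, made total with fuel; every call site passes fuel nonWater g + 1,
-- which is enough (each non-trivial level of the recursion turns one non-water cell to water)
def dfsA (N M : Int) : Nat → List (List Int) → Int → Int → List (List Int)
  | 0, g, _, _ => g
  | f + 1, g, i, j =>
    if i < 0 ∨ j < 0 ∨ N ≤ i ∨ M ≤ j ∨ cellGet g i j = 1 then g
    else
      let g1 := cellSet g i j
      let g2 := dfsA N M f g1 (i - 1) j
      let g3 := dfsA N M f g2 i (j - 1)
      let g4 := dfsA N M f g3 (i + 1) j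
      dfsA N M f g4 i (j + 1)

def closedIsland (grid : List (List Int)) : Int :=
  let N : Int := grid.length
  let M : Int := (grid.headD []).length   -- grid[0]; Pre_ excludes the empty grid
  let g1 := (PySem.List.pyRange 0 M 1).foldl (fun g i =>
      let g := dfsA N M (nonWater g + 1) g 0 i
      dfsA N M (nonWater g + 1) g (N - 1) i) grid
  let g2 := (PySem.List.pyRange 0 N 1).foldl (fun g i =>
      let g := dfsA N M (nonWater g + 1) g i 0
      dfsA N M (nonWater g + 1) g i (M - 1)) g1
  let p := (PySem.List.pyRange 0 N 1).foldl (fun p i =>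
      (PySem.List.pyRange 0 M 1).foldl (fun (p : List (List Int) × Int) j =>
        if cellGet p.1 i j = 0 then (dfsA N M (nonWater p.1 + 1) p.1 i j, p.2 + 1) else p) p)
    (g2, (0 : Int))
  p.2

-- ===== PORT B =====
-- B's while-loop over an explicit stack; Python pushes (x,y+1),(x+1,y),(x,y-1),(x-1,y) at the
-- END of the list and pops from the end, so the head of this Lean list is the top of the stack
def floodLoop (N M : Int) : List (Int × Int) → List (List Int) → List (List Int)
  | [], g => g
  | (i, j) :: rest, g =>
    if h : i < 0 ∨ j < 0 ∨ N ≤ i ∨ M ≤ j ∨ cellGet g i j = 1 then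
      floodLoop N M rest g
    else
      floodLoop N M ((i - 1, j) :: (i, j - 1) :: (i + 1, j) :: (i, j + 1) :: rest) (cellSet g i j)
termination_by stack g => (nonWater g, stack.length)
decreasing_by
  · exact Prod.Lex.right _ (by simp)
  · exact Prod.Lex.left _ _ (nonWater_cellSet_lt g i j (by tauto))

def closedIsland_alt (grid : List (List Int)) : Int :=
  let N : Int := grid.length
  let M : Int := (grid.headD []).length
  let seeds := (PySem.List.pyRange 0 M 1).flatMap (fun j => [((0 : Int), j), (N - 1, j)])
            ++ (PySem.List.pyRange 0 N 1).flatMap (fun i => [(i, (0 : Int)), (i, M - 1)])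
  let g := seeds.foldl (fun g p => floodLoop N M [p] g) grid
  let p := (PySem.List.pyRange 0 N 1).foldl (fun p i =>
      (PySem.List.pyRange 0 M 1).foldl (fun (p : List (List Int) × Int) j =>
        if cellGet p.1 i j = 0 then (floodLoop N M [(i, j)] p.1, p.2 + 1) else p) p)
    (g, (0 : Int))
  p.2

-- ===== PRECONDITION & SPEC =====
-- Pre_ excludes exactly the inputs where the Python A raises IndexError: the empty grid
-- (grid[0]) and grids with a row shorter than len(grid[0]) (the border loop indexes column
-- len(grid[0])-1 of every row)
def Pre_closedIsland (grid : List (List Int)) : Prop :=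
  grid ≠ [] ∧ ∀ r ∈ grid, (grid.headD []).length ≤ r.length

instance (grid : List (List Int)) : Decidable (Pre_closedIsland grid) := by
  unfold Pre_closedIsland; infer_instance

def pvWitness_closedIsland : List (List Int) := [[1, 1, 1], [1, 0, 1], [1, 1, 1]]

def Spec_closedIsland (grid : List (List Int)) (out : Int) : Prop := out = closedIsland_alt grid
instance (grid : List (List Int)) (out : Int) : Decidable (Spec_closedIsland grid out) := by unfold Spec_closedIsland; infer_instance

-- ===== CLAIM (what is proved, stated in full; the proofs are below) =====
def Claim_equal_closedIsland : Prop := ∀ (grid : List (List Int)), Dom_closedIsland grid → Pre_closedIsland grid → Spec_closedIsland grid (closedIsland grid)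

-- ===== LEMMAS AND PROOFS =====

theorem nonWater_dfsA_le (N M : Int) (f : Nat) (g : List (List Int)) (i j : Int) :
    nonWater (dfsA N M f g i j) ≤ nonWater g := by
  induction f generalizing g i j with
  | zero => simp [dfsA]
  | succ f ih =>
    rw [dfsA]
    split
    · exact le_rfl
    · next h =>
      refine le_trans (ih _ _ _) (le_trans (ih _ _ _) (le_trans (ih _ _ _)
        (le_trans (ih _ _ _) (le_of_lt (nonWater_cellSet_lt g i j (by tauto))))))

-- the bridge: popping one cell from the stack performs exactly A's recursive dfs from that cell
theorem floodLoop_cons (N M : Int) (f : Nat) :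
    ∀ (g : List (List Int)) (i j : Int) (rest : List (Int × Int)), nonWater g < f →
      floodLoop N M ((i, j) :: rest) g = floodLoop N M rest (dfsA N M f g i j) := by
  induction f with
  | zero => intro g i j rest h; omega
  | succ f ih =>
    intro g i j rest hf
    rw [floodLoop, dfsA]
    split
    · rfl
    · next h =>
      have hlt := nonWater_cellSet_lt g i j (by tauto)
      have h1 := nonWater_dfsA_le N M f (cellSet g i j) (i - 1) j
      have h2 := nonWater_dfsA_le N M f (dfsA N M f (cellSet g i j) (i - 1) j) i (j - 1)
      have h3 := nonWater_dfsA_le N M f (dfsA N M f (dfsA N M f (cellSet g i j) (i - 1) j) i (j - 1)) (i + 1) j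
      rw [ih _ _ _ _ (by omega), ih _ _ _ _ (by omega), ih _ _ _ _ (by omega),
          ih _ _ _ _ (by omega)]

theorem flood_eq_dfs (N M : Int) (g : List (List Int)) (i j : Int) :
    floodLoop N M [(i, j)] g = dfsA N M (nonWater g + 1) g i j := by
  rw [floodLoop_cons N M (nonWater g + 1) g i j [] (by omega), floodLoop]

theorem foldl_flatMap' {α β σ : Type} (h : α → List β) (F : σ → β → σ) (l : List α) (init : σ) :
    (l.flatMap h).foldl F init = l.foldl (fun s x => (h x).foldl F s) init := by
  induction l generalizing init with
  | nil => rfl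
  | cons a t ih => simp [List.flatMap_cons, List.foldl_append, ih]

-- ===== VERDICT (by name: the statement is the Claim_ definition above) =====
theorem closedIsland_spec : Claim_equal_closedIsland := by
  intro grid _ _
  unfold Spec_closedIsland closedIsland closedIsland_alt
  simp only [List.foldl_append, foldl_flatMap', List.foldl_cons, List.foldl_nil, flood_eq_dfs]
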